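-- pv_equiv track=rewrite | github.com/uplsh580/algo_env | programmers/may/q3-2.py | solution
-- ===== SOURCE A (Python) =====
-- def solution(s):
--     answer = []
--
--     for cur_s in s:
--         ret_s = ""
--
--         one_count = 0
--         for c in cur_s:
--             if c == "1":
--                 one_count += 1
--             else: # '0'
--                 if one_count < 2:
--                     ret_s += "1" * one_count
--                     one_count = 0
--                     ret_s += "0"
--                 else:
--                     ret_s += "110"
--                     one_count -= 2
--         ret_s += "1" * one_count
--         answer.append(ret_s)
--     return answer
-- ===== SOURCE B (Python) =====
-- def solution(s):
--     answer = []
--     for cur in s: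
--         out = []
--         p = 0
--         i = 0
--         n = len(cur)
--         while i < n:
--             k = cur[i] == '1'
--             j = i
--             while j < n and (cur[j] == '1') == k:
--                 j += 1
--             m = j - i
--             if k:
--                 p += m
--             else:
--                 t = min(m, p // 2)
--                 out.append('110' * t)
--                 p -= 2 * t
--                 if t < m:
--                     out.append('1' * p)
--                     out.append('0')
--                     out.append('0' * (m - t - 1))
--                     p = 0
--             i = j
--         out.append('1' * p)
--         answer.append(''.join(out))
--     return answer
-- ===== Notes on version B (the rewrite author's own statement) =====
-- stated objective: alternative
-- what changed: Replaces the per-character state machine with a run-length pass: each string is tokenized into maximal runs of '1'-vs-non-'1' characters and each zeros-run is handled in one arithmetic step (min(m,p//2) emissions of '110', then a single flush), building the output as a list joined once instead of repeated string concatenation.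
import Mathlib
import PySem

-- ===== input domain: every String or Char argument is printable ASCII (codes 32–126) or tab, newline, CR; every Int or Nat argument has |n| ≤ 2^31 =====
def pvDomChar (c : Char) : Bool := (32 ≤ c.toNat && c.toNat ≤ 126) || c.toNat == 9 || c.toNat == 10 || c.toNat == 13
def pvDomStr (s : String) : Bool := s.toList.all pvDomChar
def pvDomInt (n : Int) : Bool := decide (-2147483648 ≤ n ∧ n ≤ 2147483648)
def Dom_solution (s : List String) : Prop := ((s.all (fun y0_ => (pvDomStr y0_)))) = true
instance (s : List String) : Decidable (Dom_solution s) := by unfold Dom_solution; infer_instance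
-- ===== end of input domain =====

-- B rewrites A's per-character state machine as a run-length pass (alternative decomposition, same exact output).

-- ===== PORT A =====
-- A's inner loop: state (ret_s, one_count); strings handled as lists of chars.
def aStep (st : List Char × Nat) (c : Char) : List Char × Nat :=
  if c = '1' then (st.1, st.2 + 1)
  else if st.2 < 2 then (st.1 ++ List.replicate st.2 '1' ++ ['0'], 0)
  else (st.1 ++ ['1', '1', '0'], st.2 - 2)

def aTrans (cs : List Char) : List Char :=
  let st := cs.foldl aStep ([], 0)
  st.1 ++ List.replicate st.2 '1'

def solution (s : List String) : List String :=
  s.map (fun cur_s => String.ofList (aTrans cur_s.toList))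

-- ===== PORT B =====
-- B's per-string loop over maximal runs of equal key (c == '1'), carrying pending ones p.
def bGo (out : List Char) (p : Nat) (cs : List Char) : List Char :=
  match cs with
  | [] => out ++ List.replicate p '1'
  | c :: rest =>
    let k := c == '1'
    let pre := rest.takeWhile (fun d => (d == '1') == k)
    let post := rest.dropWhile (fun d => (d == '1') == k)
    let m := pre.length + 1
    if k then bGo out (p + m) post
    else
      let t := min m (p / 2)
      let p' := p - 2 * t
      if t < m then
        bGo (out ++ (List.replicate t ['1', '1', '0']).flatten ++ List.replicate p' '1'
                 ++ ['0'] ++ List.replicate (m - t - 1) '0') 0 post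
      else
        bGo (out ++ (List.replicate t ['1', '1', '0']).flatten) p' post
termination_by cs.length
decreasing_by
  all_goals
    simp only [List.length_cons]
    exact Nat.lt_succ_of_le (List.length_dropWhile_le _ rest)

def solution_alt (s : List String) : List String :=
  s.map (fun cur => String.ofList (bGo [] 0 cur.toList))

-- ===== PRECONDITION & SPEC =====
def Spec_solution (s : List String) (out : List String) : Prop := out = solution_alt s
instance (s : List String) (out : List String) : Decidable (Spec_solution s out) := by unfold Spec_solution; infer_instance

-- ===== CLAIM (what is proved, stated in full; the proofs are below) =====
def Claim_equal_solution : Prop := ∀ (s : List String), Dom_solution s → Spec_solution s (solution s)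

-- ===== LEMMAS AND PROOFS =====

-- Folding A's step over a run of ones just accumulates the count.
theorem aStep_ones (cs : List Char) (h : ∀ c ∈ cs, c = '1') (out : List Char) (p : Nat) :
    cs.foldl aStep (out, p) = (out, p + cs.length) := by
  induction cs generalizing p with
  | nil => simp
  | cons c cs ih =>
    have hc : c = '1' := h c (by simp)
    rw [List.foldl_cons, show aStep (out, p) c = (out, p + 1) from by simp [aStep, hc],
      ih (fun d hd => h d (by simp [hd]))]
    simp only [List.length_cons]
    congr 1
    omega

-- Folding A's step over a run of non-ones equals B's one-shot zeros-run formula.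
theorem aStep_zeros (cs : List Char) (h : ∀ c ∈ cs, c ≠ '1') (out : List Char) (p : Nat) :
    cs.foldl aStep (out, p) =
      (let m := cs.length
       let t := min m (p / 2)
       if t < m then
         (out ++ (List.replicate t ['1', '1', '0']).flatten ++ List.replicate (p - 2 * t) '1'
              ++ ['0'] ++ List.replicate (m - t - 1) '0', 0)
       else (out ++ (List.replicate t ['1', '1', '0']).flatten, p - 2 * t)) := by
  induction cs generalizing out p with
  | nil => simp
  | cons c cs ih =>
    have hc : c ≠ '1' := h c (by simp)
    have hrest : ∀ d ∈ cs, d ≠ '1' := fun d hd => h d (by simp [hd])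
    simp only [List.foldl_cons, aStep, if_neg hc]
    by_cases hp : p < 2
    · -- flush: p/2 = 0
      have hp2 : p / 2 = 0 := by omega
      rw [if_pos hp, ih hrest]
      simp only [List.length_cons, hp2]
      have h02 : (0 : Nat) / 2 = 0 := rfl
      by_cases hn : cs.length = 0
      · simp [hn]
      · have h1 : min cs.length (0 / 2) = 0 := by simp
        have h2 : min (cs.length + 1) 0 = 0 := by simp
        rw [if_pos (by omega : min cs.length (0/2) < cs.length),
            if_pos (by omega : min (cs.length + 1) 0 < cs.length + 1)]
        simp only [h1, h2]
        simp only [List.replicate_zero, List.flatten_nil, List.append_nil, Nat.mul_zero,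
          Nat.sub_zero]
        rw [show cs.length + 1 - 1 = (cs.length - 1) + 1 from by omega, List.replicate_succ]
        simp
    · -- consume two pending ones: '110'
      rw [if_neg hp, ih hrest]
      have hq : (p - 2) / 2 = p / 2 - 1 := by omega
      have hq1 : 1 ≤ p / 2 := by omega
      by_cases hb : cs.length ≤ p / 2 - 1
      · have ht' : min cs.length ((p - 2) / 2) = cs.length := by rw [hq]; omega
        have ht : min (cs.length + 1) (p / 2) = cs.length + 1 := by omega
        simp only [List.length_cons, ht', ht]
        rw [if_neg (by omega), if_neg (by omega)]
        rw [List.replicate_succ, List.flatten_cons]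
        simp only [List.append_assoc, Prod.mk.injEq]
        exact ⟨trivial, by omega⟩
      · have ht' : min cs.length ((p - 2) / 2) = p / 2 - 1 := by rw [hq]; omega
        have ht : min (cs.length + 1) (p / 2) = p / 2 := by omega
        simp only [List.length_cons, ht', ht]
        rw [if_pos (by omega), if_pos (by omega)]
        rw [show p / 2 = (p / 2 - 1) + 1 from by omega, List.replicate_succ, List.flatten_cons]
        have he1 : p - 2 - 2 * (p / 2 - 1) = p - 2 * ((p / 2 - 1) + 1) := by omega
        have he2 : cs.length - (p / 2 - 1) - 1 = cs.length + 1 - ((p / 2 - 1) + 1) - 1 := by omega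
        simp only [Nat.add_sub_cancel]
        rw [he1, he2]
        simp [List.append_assoc]

-- The main equivalence: A's fold followed by the final '1'-flush equals B's run loop.
theorem main_lemma (out : List Char) (p : Nat) (cs : List Char) :
    (cs.foldl aStep (out, p)).1 ++ List.replicate (cs.foldl aStep (out, p)).2 '1'
      = bGo out p cs := by
  induction out, p, cs using bGo.induct with
  | case1 out p => simp [bGo]
  | case2 out p c rest k pre post m hk ih =>
    -- ones run
    have hk1 : (c == '1') = true := hk
    have hc : c = '1' := by simpa using hk1
    have hsplit : c :: rest = (c :: pre) ++ post := by
      simp [pre, post, List.takeWhile_append_dropWhile]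
    have hones : ∀ d ∈ c :: pre, d = '1' := by
      intro d hd
      rcases List.mem_cons.mp hd with h | h
      · rw [h, hc]
      · have := List.mem_takeWhile_imp h
        rw [hk] at this; simpa using this
    conv_lhs => rw [hsplit]
    rw [List.foldl_append, aStep_ones _ hones out p]
    rw [bGo]
    simp only [hk1]
    rw [if_pos trivial]
    have hpre : List.takeWhile (fun d => (d == '1') == true) rest = pre := by rw [← hk1]
    have hpost : List.dropWhile (fun d => (d == '1') == true) rest = post := by rw [← hk1]
    rw [hpre, hpost]
    simp only [List.length_cons]
    exact ih
  | case3 out p c rest k pre post m hk t p' hlt ih =>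
    -- zeros run, t < m: flush
    have hk1 : (c == '1') = false := by
      cases hcb : (c == '1') with
      | false => rfl
      | true => exact absurd hcb hk
    have hlt' : min (pre.length + 1) (p / 2) < pre.length + 1 := hlt
    have hzeros : ∀ d ∈ c :: pre, d ≠ '1' := by
      intro d hd
      rcases List.mem_cons.mp hd with h | h
      · rw [h]; simpa using hk1
      · have := List.mem_takeWhile_imp h
        rw [show k = false from hk1] at this; simpa using this
    have hsplit : c :: rest = (c :: pre) ++ post := by
      simp [pre, post, List.takeWhile_append_dropWhile]
    conv_lhs => rw [hsplit]
    rw [List.foldl_append, aStep_zeros _ hzeros out p]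
    simp only [List.length_cons]
    rw [if_pos hlt']
    rw [bGo]
    simp only [hk1, Bool.false_eq_true, if_false]
    have hpre : List.takeWhile (fun d => (d == '1') == false) rest = pre := by rw [← hk1]
    have hpost : List.dropWhile (fun d => (d == '1') == false) rest = post := by rw [← hk1]
    rw [hpre, hpost, if_pos hlt']
    exact ih
  | case4 out p c rest k pre post m hk t p' hlt ih =>
    -- zeros run, fully absorbed by pending ones
    have hk1 : (c == '1') = false := by
      cases hcb : (c == '1') with
      | false => rfl
      | true => exact absurd hcb hk
    have hlt' : ¬ min (pre.length + 1) (p / 2) < pre.length + 1 := hlt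
    have hzeros : ∀ d ∈ c :: pre, d ≠ '1' := by
      intro d hd
      rcases List.mem_cons.mp hd with h | h
      · rw [h]; simpa using hk1
      · have := List.mem_takeWhile_imp h
        rw [show k = false from hk1] at this; simpa using this
    have hsplit : c :: rest = (c :: pre) ++ post := by
      simp [pre, post, List.takeWhile_append_dropWhile]
    conv_lhs => rw [hsplit]
    rw [List.foldl_append, aStep_zeros _ hzeros out p]
    simp only [List.length_cons]
    rw [if_neg hlt']
    rw [bGo]
    simp only [hk1, Bool.false_eq_true, if_false]
    have hpre : List.takeWhile (fun d => (d == '1') == false) rest = pre := by rw [← hk1]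
    have hpost : List.dropWhile (fun d => (d == '1') == false) rest = post := by rw [← hk1]
    rw [hpre, hpost, if_neg hlt']
    exact ih

-- ===== VERDICT (by name: the statement is the Claim_ definition above) =====
theorem solution_spec : Claim_equal_solution := by
  intro s _
  unfold Spec_solution solution solution_alt
  apply List.map_congr_left
  intro cur _
  unfold aTrans
  rw [← main_lemma]
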